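-- pv_equiv track=rewrite | github.com/IronAdamant/PythonBol-Translator | src/cobol_safe_translator/line_preprocessor.py | _preprocess_free_format
-- ===== SOURCE A (Python) =====
-- def _preprocess_free_format(raw_text: str) -> list[str]:
--     """Preprocess free-format COBOL source into logical lines.
--
--     Free-format COBOL:
--     - No sequence numbers (cols 1-6)
--     - No indicator area (col 7)
--     - Comments use *> (can appear anywhere on line)
--     - No column 72 limit
--     - Continuation uses & at end of line (rare; we handle simple cases)
--     """
--     logical: list[str] = []
--
--     for line in raw_text.splitlines():
--         # Strip inline comments (*> to end of line, but not inside literals)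
--         content = _strip_free_comment(line).rstrip()
--         if not content:
--             continue
--
--         # Skip full-line comments
--         stripped = content.lstrip()
--         if stripped.startswith("*"):
--             continue
--
--         logical.append(stripped)
--
--     return logical
--
-- def _strip_free_comment(line: str) -> str:
--     """Remove *> inline comments from a line, respecting string literals."""
--     in_quote: str | None = None
--     i = 0
--     while i < len(line):
--         ch = line[i]
--         if in_quote:
--             if ch == in_quote:
--                 in_quote = None
--         elif ch in ('"', "'"):
--             in_quote = ch
--         elif ch == '*' and i + 1 < len(line) and line[i + 1] == '>':
--             return line[:i]
--         i += 1
--     return line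
-- ===== SOURCE B (Python) =====
-- def _find_comment_cut(line: str) -> int:
--     """Index where an inline *> comment starts (outside literals), or -1.
--
--     Instead of a char-by-char state machine, jump between interesting
--     positions with str.find: locate the next '*>' and the next quote; if
--     the quote comes first, leap straight past the whole quoted span (an
--     unterminated quote protects the rest of the line)."""
--     i = 0
--     while True:
--         star = line.find('*>', i)
--         if star == -1:
--             return -1
--         dq = line.find('"', i)
--         sq = line.find("'", i)
--         q = min(p for p in (dq, sq) if p != -1) if (dq != -1 or sq != -1) else -1
--         if q == -1 or star < q:
--             return star
--         close = line.find(line[q], q + 1)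
--         if close == -1:
--             return -1
--         i = close + 1
--
--
-- def _clean_line(line: str) -> str:
--     cut = _find_comment_cut(line)
--     return (line if cut == -1 else line[:cut]).strip()
--
--
-- def _preprocess_free_format(raw_text: str) -> list[str]:
--     cleaned = (_clean_line(line) for line in raw_text.splitlines())
--     return [s for s in cleaned if s and not s.startswith("*")]
-- ===== Notes on version B (the rewrite author's own statement) =====
-- stated objective: faster
-- what changed: The char-by-char quote-state machine is replaced by a scanner that uses str.find to jump straight to the next comment marker or quote and to leap over whole quoted spans, and the outer accumulator loop becomes a comprehension over cleaned lines.
import Mathlib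
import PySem

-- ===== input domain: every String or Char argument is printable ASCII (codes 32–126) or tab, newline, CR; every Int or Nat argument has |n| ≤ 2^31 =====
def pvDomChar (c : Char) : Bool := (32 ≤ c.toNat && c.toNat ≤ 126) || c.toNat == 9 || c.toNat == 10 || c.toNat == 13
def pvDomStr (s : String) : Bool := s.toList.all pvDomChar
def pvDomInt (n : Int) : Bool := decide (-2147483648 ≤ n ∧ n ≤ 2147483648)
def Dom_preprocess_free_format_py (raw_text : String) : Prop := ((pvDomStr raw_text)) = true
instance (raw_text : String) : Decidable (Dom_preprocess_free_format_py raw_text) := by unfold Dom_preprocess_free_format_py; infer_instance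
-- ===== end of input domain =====

-- B replaces A's per-character quote-state machine by a str.find-based scanner that jumps
-- over quoted spans, and the accumulator loop by a comprehension over cleaned lines
-- (alternative decomposition; return values proved identical on all inputs).

-- ===== PORT A =====
-- _strip_free_comment: while loop over index i with quote state
def stripFreeCommentGo (ln : List Char) (inQuote : Option Char) (i : Nat) : List Char :=
  if h : i < ln.length then
    let ch := ln[i]
    match inQuote with
    | some q =>
        if ch = q then stripFreeCommentGo ln none (i + 1)
        else stripFreeCommentGo ln (some q) (i + 1)
    | none =>
        if ch = '"' ∨ ch = '\'' then stripFreeCommentGo ln (some ch) (i + 1)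
        else if ch = '*' ∧ ln[i + 1]? = some '>' then
          PySem.List.slice ln none (some (i : Int))
        else stripFreeCommentGo ln none (i + 1)
  else ln
termination_by ln.length - i

def preprocess_free_format_py (raw_text : String) : List String :=
  (PySem.Chars.splitlines raw_text.toList).foldl (fun logical ln =>
    let content := PySem.Chars.rstrip (stripFreeCommentGo ln none 0)
    if content.isEmpty then logical
    else
      let stripped := PySem.Chars.lstrip content
      if PySem.Chars.startswith stripped ['*'] then logical
      else logical ++ [String.ofList stripped]) []

-- ===== PORT B =====
-- _find_comment_cut: jump with str.find between the next comment marker and the next quote.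
-- fuel = ln.length + 1 is a totality guard only (i grows by at least 2 per loop turn).
def findCommentCutGo (ln : List Char) (fuel : Nat) (i : Int) : Int :=
  match fuel with
  | 0 => -1
  | fuel' + 1 =>
    let star := PySem.Chars.findFrom ln ['*', '>'] i
    if star = -1 then -1
    else
      let dq := PySem.Chars.findFrom ln ['"'] i
      let sq := PySem.Chars.findFrom ln ['\''] i
      let q := if dq = -1 then sq else if sq = -1 then dq else min dq sq
      if q = -1 ∨ star < q then star
      else
        let qc := ln.getD q.toNat ' '
        let close := PySem.Chars.findFrom ln [qc] (q + 1)
        if close = -1 then -1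
        else findCommentCutGo ln fuel' (close + 1)

-- _clean_line
def cleanLine (ln : List Char) : List Char :=
  let cut := findCommentCutGo ln (ln.length + 1) 0
  PySem.Chars.strip (if cut = -1 then ln else PySem.List.slice ln none (some cut))

def preprocess_free_format_py_alt (raw_text : String) : List String :=
  ((PySem.Chars.splitlines raw_text.toList).map cleanLine).filterMap (fun s =>
    if s ≠ [] ∧ ¬ PySem.Chars.startswith s ['*'] = true then some (String.ofList s) else none)

-- ===== PRECONDITION & SPEC =====
def Spec_preprocess_free_format_py (raw_text : String) (out : List String) : Prop := out = preprocess_free_format_py_alt raw_text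
instance (raw_text : String) (out : List String) : Decidable (Spec_preprocess_free_format_py raw_text out) := by unfold Spec_preprocess_free_format_py; infer_instance

-- ===== CLAIM (what is proved, stated in full; the proofs are below) =====
def Claim_equal_preprocess_free_format_py : Prop := ∀ (raw_text : String), Dom_preprocess_free_format_py raw_text → Spec_preprocess_free_format_py raw_text (preprocess_free_format_py raw_text)

-- ===== LEMMAS AND PROOFS =====

def isQuoteAt (ln : List Char) (j : Nat) : Prop := ln[j]? = some '"' ∨ ln[j]? = some '\''

def isStarAt (ln : List Char) (j : Nat) : Prop := ln[j]? = some '*' ∧ ln[j + 1]? = some '>'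

theorem stripA_end (ln : List Char) (st : Option Char) (i : Nat) (h : ln.length ≤ i) :
    stripFreeCommentGo ln st i = ln := by
  rw [stripFreeCommentGo]; exact dif_neg (by omega)

theorem stripA_open (ln : List Char) (i : Nat) (c : Char) (hc : ln[i]? = some c)
    (hq : c = '"' ∨ c = '\'') :
    stripFreeCommentGo ln none i = stripFreeCommentGo ln (some c) (i + 1) := by
  obtain ⟨hlt, hg⟩ := List.getElem?_eq_some_iff.mp hc
  rw [stripFreeCommentGo]
  simp only [dif_pos hlt, hg, if_pos hq]

theorem stripA_star (ln : List Char) (i : Nat) (h1 : ln[i]? = some '*') (h2 : ln[i + 1]? = some '>') :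
    stripFreeCommentGo ln none i = ln.take i := by
  obtain ⟨hlt, hg⟩ := List.getElem?_eq_some_iff.mp h1
  rw [stripFreeCommentGo]
  simp [hlt, hg, h2, PySem.List.slice_to_natCast]

theorem stripA_skip_none (ln : List Char) (i : Nat) (hlt : i < ln.length)
    (hq : ¬ isQuoteAt ln i) (hs : ¬ isStarAt ln i) :
    stripFreeCommentGo ln none i = stripFreeCommentGo ln none (i + 1) := by
  have hg : ln[i]? = some ln[i] := List.getElem?_eq_getElem hlt
  rw [stripFreeCommentGo]
  simp only [dif_pos hlt]
  rw [if_neg, if_neg]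
  · rintro ⟨h1, h2⟩; exact hs ⟨by rw [hg, h1], h2⟩
  · rintro (h | h) <;> [exact hq (Or.inl (by rw [hg, h])); exact hq (Or.inr (by rw [hg, h]))]

theorem stripA_close (ln : List Char) (i : Nat) (q : Char) (hc : ln[i]? = some q) :
    stripFreeCommentGo ln (some q) i = stripFreeCommentGo ln none (i + 1) := by
  obtain ⟨hlt, hg⟩ := List.getElem?_eq_some_iff.mp hc
  rw [stripFreeCommentGo]
  simp [hlt, hg]

theorem stripA_skip_quote (ln : List Char) (i : Nat) (q : Char) (hlt : i < ln.length)
    (hne : ln[i]? ≠ some q) :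
    stripFreeCommentGo ln (some q) i = stripFreeCommentGo ln (some q) (i + 1) := by
  have hg : ln[i]? = some ln[i] := List.getElem?_eq_getElem hlt
  rw [stripFreeCommentGo]
  simp only [dif_pos hlt]
  rw [if_neg (fun h => hne (by rw [hg, h]))]

theorem stripA_skip_none_upto (ln : List Char) (e : Nat) :
    ∀ i, i ≤ e → (∀ j, i ≤ j → j < e → ¬ isQuoteAt ln j ∧ ¬ isStarAt ln j) →
      stripFreeCommentGo ln none i = stripFreeCommentGo ln none e := by
  intro i hle hno
  induction hd : e - i generalizing i with
  | zero => have : i = e := by omega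
            rw [this]
  | succ d ih =>
    have hlt : i < e := by omega
    by_cases hL : i < ln.length
    · rw [stripA_skip_none ln i hL (hno i le_rfl hlt).1 (hno i le_rfl hlt).2]
      exact ih (i + 1) (by omega) (fun j h1 h2 => hno j (by omega) h2) (by omega)
    · rw [stripA_end ln none i (by omega), stripA_end ln none e (by omega)]

theorem stripA_skip_quote_upto (ln : List Char) (q : Char) (e : Nat) :
    ∀ i, i ≤ e → (∀ j, i ≤ j → j < e → ln[j]? ≠ some q) →
      stripFreeCommentGo ln (some q) i = stripFreeCommentGo ln (some q) e := by
  intro i hle hno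
  induction hd : e - i generalizing i with
  | zero => have : i = e := by omega
            rw [this]
  | succ d ih =>
    have hlt : i < e := by omega
    by_cases hL : i < ln.length
    · rw [stripA_skip_quote ln i q hL (hno i le_rfl hlt)]
      exact ih (i + 1) (by omega) (fun j h1 h2 => hno j (by omega) h2) (by omega)
    · rw [stripA_end ln (some q) i (by omega), stripA_end ln (some q) e (by omega)]

theorem stripA_no_star (ln : List Char) :
    ∀ i, (∀ j, i ≤ j → ¬ isStarAt ln j) → ∀ st, stripFreeCommentGo ln st i = ln := by
  intro i
  induction hd : ln.length - i generalizing i with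
  | zero => intro _ st; exact stripA_end ln st i (by omega)
  | succ d ih =>
    intro hno st
    have hL : i < ln.length := by omega
    have hg : ln[i]? = some ln[i] := List.getElem?_eq_getElem hL
    have ihs := fun st => ih (i + 1) (by omega) (fun j h1 => hno j (by omega)) st
    match st with
    | some q =>
      by_cases hq : ln[i]? = some q
      · rw [stripA_close ln i q hq]; exact ihs none
      · rw [stripA_skip_quote ln i q hL hq]; exact ihs (some q)
    | none =>
      by_cases hq : isQuoteAt ln i
      · rcases hq with h | h
        · rw [stripA_open ln i '"' h (Or.inl rfl)]; exact ihs (some '"')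
        · rw [stripA_open ln i '\'' h (Or.inr rfl)]; exact ihs (some '\'')
      · rw [stripA_skip_none ln i hL hq (hno i le_rfl)]; exact ihs none

theorem stripA_no_close (ln : List Char) (q : Char) :
    ∀ i, (∀ j, i ≤ j → ln[j]? ≠ some q) →
      stripFreeCommentGo ln (some q) i = ln := by
  intro i
  induction hd : ln.length - i generalizing i with
  | zero => intro _; exact stripA_end ln (some q) i (by omega)
  | succ d ih =>
    intro hnoq
    have hL : i < ln.length := by omega
    rw [stripA_skip_quote ln i q hL (hnoq i le_rfl)]
    exact ih (i + 1) (by omega) (fun j h1 => hnoq j (by omega))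

theorem prefix_singleton_iff (a : Char) (l : List Char) : [a] <+: l ↔ l[0]? = some a := by
  cases l with
  | nil => simp
  | cons b t => simp [List.cons_prefix_cons]; tauto

theorem prefix_pair_iff (a b : Char) (l : List Char) :
    [a, b] <+: l ↔ l[0]? = some a ∧ l[1]? = some b := by
  cases l with
  | nil => simp
  | cons c t =>
    cases t with
    | nil => simp [List.cons_prefix_cons]
    | cons d u => simp [List.cons_prefix_cons]; tauto

theorem infix_iff_drop (t l : List Char) : t <:+: l ↔ ∃ n, t <+: l.drop n := by
  constructor
  · rintro ⟨s, u, rfl⟩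
    exact ⟨s.length, by simp⟩
  · rintro ⟨n, h⟩
    exact h.isInfix.trans (l.drop_suffix n).isInfix

theorem isStarAt_iff_prefix_drop (ln : List Char) (j : Nat) :
    isStarAt ln j ↔ ['*', '>'] <+: ln.drop j := by
  rw [prefix_pair_iff, List.getElem?_drop, List.getElem?_drop, isStarAt]
  constructor
  · rintro ⟨h1, h2⟩; exact ⟨by simpa using h1, by simpa using h2⟩
  · rintro ⟨h1, h2⟩; exact ⟨by simpa using h1, by simpa using h2⟩

theorem charAt_iff_prefix_drop (ln : List Char) (c : Char) (j : Nat) :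
    ln[j]? = some c ↔ [c] <+: ln.drop j := by
  rw [prefix_singleton_iff, List.getElem?_drop]
  simp

theorem findPair_cases (ln : List Char) (k : Nat) (hk : k ≤ ln.length) :
    (PySem.Chars.findFrom ln ['*', '>'] (k : Int) = -1 ∧ ∀ j, k ≤ j → ¬ isStarAt ln j) ∨
    (∃ m : Nat, PySem.Chars.findFrom ln ['*', '>'] (k : Int) = (m : Int) ∧ k ≤ m ∧
      isStarAt ln m ∧ ∀ j, k ≤ j → j < m → ¬ isStarAt ln j) := by
  by_cases h : PySem.Chars.findFrom ln ['*', '>'] (k : Int) = -1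
  · refine Or.inl ⟨h, fun j hj hs => ?_⟩
    have hni := (PySem.Chars.findFrom_natCast_eq_neg_one_iff ln ['*', '>'] k hk).mp h
    exact hni ((infix_iff_drop _ _).mpr ⟨j - k, by
      rw [List.drop_drop]
      have : k + (j - k) = j := by omega
      rw [this]
      exact (isStarAt_iff_prefix_drop ln j).mp hs⟩)
  · obtain ⟨h1, h2, h3⟩ := PySem.Chars.findFrom_natCast_spec ln ['*', '>'] k hk h
    refine Or.inr ⟨(PySem.Chars.findFrom ln ['*', '>'] (k : Int)).toNat, ?_, ?_, ?_, ?_⟩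
    · omega
    · omega
    · exact (isStarAt_iff_prefix_drop ln _).mpr h2
    · intro j hj hjl hs
      exact h3 j hj hjl ((isStarAt_iff_prefix_drop ln j).mp hs)

theorem findChar_cases (ln : List Char) (c : Char) (k : Nat) (hk : k ≤ ln.length) :
    (PySem.Chars.findFrom ln [c] (k : Int) = -1 ∧ ∀ j, k ≤ j → ln[j]? ≠ some c) ∨
    (∃ m : Nat, PySem.Chars.findFrom ln [c] (k : Int) = (m : Int) ∧ k ≤ m ∧
      ln[m]? = some c ∧ ∀ j, k ≤ j → j < m → ln[j]? ≠ some c) := by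
  by_cases h : PySem.Chars.findFrom ln [c] (k : Int) = -1
  · refine Or.inl ⟨h, fun j hj hs => ?_⟩
    have hni := (PySem.Chars.findFrom_natCast_eq_neg_one_iff ln [c] k hk).mp h
    exact hni ((infix_iff_drop _ _).mpr ⟨j - k, by
      rw [List.drop_drop]
      have : k + (j - k) = j := by omega
      rw [this]
      exact (charAt_iff_prefix_drop ln c j).mp hs⟩)
  · obtain ⟨h1, h2, h3⟩ := PySem.Chars.findFrom_natCast_spec ln [c] k hk h
    refine Or.inr ⟨(PySem.Chars.findFrom ln [c] (k : Int)).toNat, ?_, ?_, ?_, ?_⟩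
    · omega
    · omega
    · exact (charAt_iff_prefix_drop ln c _).mpr h2
    · intro j hj hjl hs
      exact h3 j hj hjl ((charAt_iff_prefix_drop ln c j).mp hs)

theorem q_cases (ln : List Char) (k : Nat) (hk : k ≤ ln.length) :
    (let dq := PySem.Chars.findFrom ln ['"'] (k : Int)
     let sq := PySem.Chars.findFrom ln ['\''] (k : Int)
     let q := if dq = -1 then sq else if sq = -1 then dq else min dq sq
     (q = -1 ∧ ∀ j, k ≤ j → ¬ isQuoteAt ln j) ∨
     (∃ qn : Nat, q = (qn : Int) ∧ k ≤ qn ∧ isQuoteAt ln qn ∧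
        ∀ j, k ≤ j → j < qn → ¬ isQuoteAt ln j)) := by
  rcases findChar_cases ln '"' k hk with ⟨hd, hnd⟩ | ⟨md, hd, hkd, hcd, hmind⟩ <;>
    rcases findChar_cases ln '\'' k hk with ⟨hs, hns⟩ | ⟨ms, hs, hks, hcs, hmins⟩ <;>
      simp only [hd, hs]
  · exact Or.inl ⟨by simp, fun j hj h => h.elim (hnd j hj) (hns j hj)⟩
  · refine Or.inr ⟨ms, by simp, hks, Or.inr hcs, fun j hj hjl h => ?_⟩
    exact h.elim (hnd j hj) (hmins j hj hjl)
  · refine Or.inr ⟨md, by simp [show (md : Int) ≠ -1 by omega], hkd, Or.inl hcd,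
      fun j hj hjl h => ?_⟩
    exact h.elim (hmind j hj hjl) (hns j hj)
  · rw [if_neg (by omega), if_neg (by omega)]
    by_cases hmm : md ≤ ms
    · refine Or.inr ⟨md, by omega, hkd, Or.inl hcd, fun j hj hjl h => ?_⟩
      exact h.elim (hmind j hj hjl) (hmins j hj (by omega))
    · refine Or.inr ⟨ms, by omega, hks, Or.inr hcs, fun j hj hjl h => ?_⟩
      exact h.elim (hmind j hj (by omega)) (hmins j hj hjl)

theorem main_quote_step (ln : List Char) (fuel' k qn : Nat) (qc : Char)
    (ih : ∀ k', ln.length + 2 ≤ 2 * fuel' + k' → k' ≤ ln.length →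
      (stripFreeCommentGo ln none k' =
        (if findCommentCutGo ln fuel' (k' : Int) = -1 then ln
         else ln.take (findCommentCutGo ln fuel' (k' : Int)).toNat)) ∧
      -1 ≤ findCommentCutGo ln fuel' (k' : Int))
    (hfuel : ln.length + 2 ≤ 2 * (fuel' + 1) + k)
    (hkq : k ≤ qn) (hc : ln[qn]? = some qc) (hqior : qc = '"' ∨ qc = '\'')
    (hnq : ∀ j, k ≤ j → j < qn → ¬ isQuoteAt ln j)
    (hns : ∀ j, k ≤ j → j < qn → ¬ isStarAt ln j) :
    (stripFreeCommentGo ln none k =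
      (if (if PySem.Chars.findFrom ln [qc] ((qn : Int) + 1) = -1 then -1
           else findCommentCutGo ln fuel' (PySem.Chars.findFrom ln [qc] ((qn : Int) + 1) + 1)) = -1
       then ln
       else ln.take (if PySem.Chars.findFrom ln [qc] ((qn : Int) + 1) = -1 then -1
           else findCommentCutGo ln fuel' (PySem.Chars.findFrom ln [qc] ((qn : Int) + 1) + 1)).toNat)) ∧
    -1 ≤ (if PySem.Chars.findFrom ln [qc] ((qn : Int) + 1) = -1 then -1
          else findCommentCutGo ln fuel' (PySem.Chars.findFrom ln [qc] ((qn : Int) + 1) + 1)) := by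
  have hqnlen : qn < ln.length := (List.getElem?_eq_some_iff.mp hc).1
  have hskip : stripFreeCommentGo ln none k = stripFreeCommentGo ln (some qc) (qn + 1) := by
    rw [stripA_skip_none_upto ln qn k hkq (fun j a b => ⟨hnq j a b, hns j a b⟩),
      stripA_open ln qn qc hc hqior]
  have hcast : ((qn : Int) + 1) = ((qn + 1 : Nat) : Int) := by push_cast; ring
  rw [hcast]
  rcases findChar_cases ln qc (qn + 1) hqnlen with ⟨hcl, hncl⟩ | ⟨mc, hcl, hkc, hcc, hminc⟩
  · rw [hcl]
    simp only [reduceIte]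
    refine ⟨?_, by omega⟩
    rw [hskip, stripA_no_close ln qc (qn + 1) hncl]
  · have hmclen : mc < ln.length := (List.getElem?_eq_some_iff.mp hcc).1
    rw [hcl,
      show (if ((mc : Int)) = -1 then (-1 : Int)
            else findCommentCutGo ln fuel' ((mc : Int) + 1)) =
          findCommentCutGo ln fuel' ((mc : Int) + 1) from if_neg (by omega)]
    have hcast2 : ((mc : Int) + 1) = ((mc + 1 : Nat) : Int) := by push_cast; ring
    rw [hcast2]
    have hA : stripFreeCommentGo ln none k = stripFreeCommentGo ln none (mc + 1) := by
      rw [hskip, stripA_skip_quote_upto ln qc mc (qn + 1) hkc (fun j a b => hminc j a b),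
        stripA_close ln mc qc hcc]
    rw [hA]
    exact ih (mc + 1) (by omega) (by omega)

theorem main_strip (ln : List Char) :
    ∀ fuel k, ln.length + 2 ≤ 2 * fuel + k → k ≤ ln.length →
      (stripFreeCommentGo ln none k =
        (if findCommentCutGo ln fuel (k : Int) = -1 then ln
         else ln.take (findCommentCutGo ln fuel (k : Int)).toNat)) ∧
      -1 ≤ findCommentCutGo ln fuel (k : Int) := by
  intro fuel
  induction fuel with
  | zero => intro k h1 h2; omega
  | succ fuel' ih =>
    intro k hfuel hk
    rcases findPair_cases ln k hk with ⟨hstar, hnos⟩ | ⟨m, hstar, hkm, hsm, hmins⟩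
    · -- no '*>' anywhere from k: B gives -1, A returns ln
      have hB : findCommentCutGo ln (fuel' + 1) (k : Int) = -1 := by
        simp only [findCommentCutGo, hstar, reduceIte]
      rw [hB]
      exact ⟨by rw [if_pos rfl]; exact stripA_no_star ln k hnos none, by omega⟩
    · have hmlen : m < ln.length := (List.getElem?_eq_some_iff.mp hsm.1).1
      rcases q_cases ln k hk with ⟨hq, hnq⟩ | ⟨qn, hq, hkq, hqq, hminq⟩
      · have hB : findCommentCutGo ln (fuel' + 1) (k : Int) = (m : Int) := by
          simp only [findCommentCutGo, hstar, hq]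
          rw [if_neg (by omega), if_pos (Or.inl trivial)]
        rw [hB]
        refine ⟨?_, by omega⟩
        rw [if_neg (by omega), Int.toNat_natCast,
          stripA_skip_none_upto ln m k hkm (fun j a b => ⟨hnq j a, hmins j a b⟩),
          stripA_star ln m hsm.1 hsm.2]
      · by_cases hlt : m < qn
        · have hB : findCommentCutGo ln (fuel' + 1) (k : Int) = (m : Int) := by
            simp only [findCommentCutGo, hstar, hq]
            rw [if_neg (by omega), if_pos (Or.inr (by omega))]
          rw [hB]
          refine ⟨?_, by omega⟩
          rw [if_neg (by omega), Int.toNat_natCast,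
            stripA_skip_none_upto ln m k hkm
              (fun j a b => ⟨hminq j a (by omega), hmins j a b⟩),
            stripA_star ln m hsm.1 hsm.2]
        · have hqm : qn ≤ m := by omega
          have hns' : ∀ j, k ≤ j → j < qn → ¬ isStarAt ln j :=
            fun j a b => hmins j a (by omega)
          have hqq' : ln[qn]? = some '"' ∨ ln[qn]? = some '\'' := hqq
          simp only [findCommentCutGo, hstar, hq]
          simp only [if_neg (show ¬ ((m : Int) = -1) by omega),
            if_neg (show ¬ ((qn : Int) = -1 ∨ (m : Int) < (qn : Int)) by omega),
            Int.toNat_natCast]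
          rcases hqq' with h | h
          · have hgd : ln.getD qn ' ' = '"' := by
              rw [List.getD_eq_getElem?_getD, h]; rfl
            rw [hgd]
            exact main_quote_step ln fuel' k qn '"' ih hfuel hkq h (Or.inl rfl) hminq hns'
          · have hgd : ln.getD qn ' ' = '\'' := by
              rw [List.getD_eq_getElem?_getD, h]; rfl
            rw [hgd]
            exact main_quote_step ln fuel' k qn '\'' ih hfuel hkq h (Or.inr rfl) hminq hns'

theorem rstrip_cons (c : Char) (t : List Char) :
    PySem.Chars.rstrip (c :: t) =
      if PySem.Chars.rstrip t = [] then (if PySem.Chars.isspace c then [] else [c])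
      else c :: PySem.Chars.rstrip t := by
  simp only [PySem.Chars.rstrip, List.reverse_cons, List.dropWhile_append]
  by_cases h : List.dropWhile PySem.Chars.isspace t.reverse = []
  · simp [h, List.dropWhile]
    by_cases hc : PySem.Chars.isspace c <;> simp [hc]
  · have h2 : (List.dropWhile PySem.Chars.isspace t.reverse).isEmpty = false := by
      simpa [List.isEmpty_iff] using h
    rw [h2]
    simp [List.reverse_eq_nil_iff, h]

theorem lstrip_rstrip_comm (x : List Char) :
    PySem.Chars.lstrip (PySem.Chars.rstrip x) = PySem.Chars.rstrip (PySem.Chars.lstrip x) := by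
  induction x with
  | nil => rfl
  | cons c t ih =>
    by_cases hc : PySem.Chars.isspace c
    · rw [rstrip_cons]
      have hl : PySem.Chars.lstrip (c :: t) = PySem.Chars.lstrip t := by
        simp [PySem.Chars.lstrip, hc]
      rw [hl, ← ih]
      by_cases h : PySem.Chars.rstrip t = []
      · simp [h, hc, PySem.Chars.lstrip]
      · rw [if_neg h]
        simp [PySem.Chars.lstrip, hc]
    · have hl : PySem.Chars.lstrip (c :: t) = c :: t := by
        simp [PySem.Chars.lstrip, hc]
      rw [hl, rstrip_cons]
      by_cases h : PySem.Chars.rstrip t = []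
      · simp [h, hc, PySem.Chars.lstrip]
      · rw [if_neg h]
        exact List.dropWhile_cons_of_neg (by simpa using hc)

theorem lstrip_eq_nil_iff (x : List Char) :
    PySem.Chars.lstrip x = [] ↔ ∀ c ∈ x, PySem.Chars.isspace c := by
  simp [PySem.Chars.lstrip, List.dropWhile_eq_nil_iff]

theorem rstrip_eq_nil_iff (x : List Char) :
    PySem.Chars.rstrip x = [] ↔ ∀ c ∈ x, PySem.Chars.isspace c := by
  simp [PySem.Chars.rstrip, List.dropWhile_eq_nil_iff, List.reverse_eq_nil_iff]

theorem strip_eq_nil_iff_rstrip (x : List Char) :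
    PySem.Chars.strip x = [] ↔ PySem.Chars.rstrip x = [] := by
  rw [PySem.Chars.strip, ← lstrip_rstrip_comm, rstrip_eq_nil_iff, lstrip_eq_nil_iff]
  constructor
  · intro h
    by_contra hne
    have hdw : List.dropWhile PySem.Chars.isspace x.reverse ≠ [] := by
      intro hh
      exact hne (fun c hm => (List.dropWhile_eq_nil_iff.mp hh) c (List.mem_reverse.mpr hm))
    have hhead := List.head_dropWhile_not PySem.Chars.isspace hdw
    have hmem : (List.dropWhile PySem.Chars.isspace x.reverse).head hdw ∈
        PySem.Chars.rstrip x := by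
      simp only [PySem.Chars.rstrip, List.mem_reverse]
      exact List.head_mem hdw
    have := h _ hmem
    rw [hhead] at this
    exact Bool.noConfusion this
  · intro h c hm
    have hsub : c ∈ x.reverse := (List.dropWhile_sublist _).mem
      (by simpa [PySem.Chars.rstrip, List.mem_reverse] using hm)
    exact h c (List.mem_reverse.mp hsub)

theorem cleanLine_eq (ln : List Char) :
    cleanLine ln = PySem.Chars.strip (stripFreeCommentGo ln none 0) := by
  obtain ⟨heq, hge⟩ := main_strip ln (ln.length + 1) 0 (by omega) (by omega)
  rw [cleanLine, heq]
  by_cases hc : findCommentCutGo ln (ln.length + 1) ((0 : Nat) : Int) = -1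
  · simp only [show ((0 : Nat) : Int) = (0 : Int) from rfl] at hc ⊢
    rw [if_pos hc, if_pos hc]
  · simp only [show ((0 : Nat) : Int) = (0 : Int) from rfl] at hc hge heq ⊢
    rw [if_neg hc, if_neg hc, PySem.List.slice_to ln (b := findCommentCutGo ln (ln.length + 1) 0) (by omega)]

theorem per_line (ln : List Char) (acc : List String) :
    (let content := PySem.Chars.rstrip (stripFreeCommentGo ln none 0)
     if content.isEmpty then acc
     else
       let stripped := PySem.Chars.lstrip content
       if PySem.Chars.startswith stripped ['*'] then acc
       else acc ++ [String.ofList stripped]) =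
    acc ++ (if cleanLine ln ≠ [] ∧ ¬ PySem.Chars.startswith (cleanLine ln) ['*'] = true
            then some (String.ofList (cleanLine ln)) else none).toList := by
  rw [cleanLine_eq]
  set x := stripFreeCommentGo ln none 0 with hx
  have hls : PySem.Chars.lstrip (PySem.Chars.rstrip x) = PySem.Chars.strip x := by
    rw [PySem.Chars.strip, lstrip_rstrip_comm]
  by_cases he : PySem.Chars.rstrip x = []
  · have hs : PySem.Chars.strip x = [] := (strip_eq_nil_iff_rstrip x).mpr he
    simp [he, hs]
  · have hs : PySem.Chars.strip x ≠ [] := fun h => he ((strip_eq_nil_iff_rstrip x).mp h)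
    simp only [List.isEmpty_iff, if_neg he, hls]
    by_cases hst : PySem.Chars.startswith (PySem.Chars.strip x) ['*'] = true
    · simp [hst]
    · simp [hst, hs]

theorem fold_eq (L : List (List Char)) : ∀ acc : List String,
    L.foldl (fun logical ln =>
      let content := PySem.Chars.rstrip (stripFreeCommentGo ln none 0)
      if content.isEmpty then logical
      else
        let stripped := PySem.Chars.lstrip content
        if PySem.Chars.startswith stripped ['*'] then logical
        else logical ++ [String.ofList stripped]) acc =
    acc ++ (L.map cleanLine).filterMap (fun s =>
      if s ≠ [] ∧ ¬ PySem.Chars.startswith s ['*'] = true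
      then some (String.ofList s) else none) := by
  induction L with
  | nil => intro acc; simp
  | cons ln t ih =>
    intro acc
    rw [List.foldl_cons, ih, List.map_cons, List.filterMap_cons]
    have := per_line ln acc
    simp only at this
    rw [this]
    cases hg : (if cleanLine ln ≠ [] ∧ ¬ PySem.Chars.startswith (cleanLine ln) ['*'] = true
        then some (String.ofList (cleanLine ln)) else none) with
    | none => simp
    | some b => simp

theorem final_eq (raw_text : String) :
    preprocess_free_format_py raw_text = preprocess_free_format_py_alt raw_text := by
  rw [preprocess_free_format_py, preprocess_free_format_py_alt, fold_eq]
  simp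

-- ===== VERDICT (by name: the statement is the Claim_ definition above) =====
theorem preprocess_free_format_py_spec : Claim_equal_preprocess_free_format_py := by
  intro raw_text _
  exact final_eq raw_text
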